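-- pv_equiv track=rewrite | github.com/avinashtrivedi/Python_Code | player.py | common_players
-- ===== SOURCE A (Python) =====
-- def common_players(roster):
--     """Returns a dictionary containing values along with a corresponding
--     list of keys that had that value from the original dictionary.
--     >>> full_roster = {"bob": "Team A", "barnum": "Team B", "beatrice": "Team C", "bernice": "Team B", "ben": "Team D", "belle": "Team A", "bill": "Team B", "bernie": "Team B", "baxter": "Team A"}
--     >>> common_players(full_roster)
--     {'Team A': ['bob', 'belle', 'baxter'], 'Team B': ['barnum', 'bernice', 'bill', 'bernie'], 'Team C': ['beatrice'], 'Team D': ['ben']}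
--     """
--
--     # define a new empty dictionary
--     new_dict = {}
--
--     # iterate through the items of roster
--     for val,key in roster.items():
--
--         # add key and value to the new dictionary
--         # if key is not present then add the key:value pair
--         if key not in new_dict:
--             new_dict[key] = [val]
--
--         # if key is present then append the value for the corresponding key
--         else:
--             new_dict[key].append(val)
--
--     # finally return the new_dict
--     return new_dict
-- ===== SOURCE B (Python) =====
-- def common_players(roster):
--     """Returns a dictionary containing values along with a corresponding
--     list of keys that had that value from the original dictionary."""
--     # distinct values in first-occurrence order, then one full rescan per group
--     return {v: [k for k, x in roster.items() if x == v]
--             for v in dict.fromkeys(roster.values())}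
-- ===== Notes on version B (the rewrite author's own statement) =====
-- stated objective: idiomatic
-- what changed: A builds the grouping in one pass with a dict whose lists it mutates; B instead computes the distinct values in first-occurrence order with dict.fromkeys(roster.values()) and builds the result as a dict comprehension that rescans all of roster.items() once per distinct value.
import Mathlib
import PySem

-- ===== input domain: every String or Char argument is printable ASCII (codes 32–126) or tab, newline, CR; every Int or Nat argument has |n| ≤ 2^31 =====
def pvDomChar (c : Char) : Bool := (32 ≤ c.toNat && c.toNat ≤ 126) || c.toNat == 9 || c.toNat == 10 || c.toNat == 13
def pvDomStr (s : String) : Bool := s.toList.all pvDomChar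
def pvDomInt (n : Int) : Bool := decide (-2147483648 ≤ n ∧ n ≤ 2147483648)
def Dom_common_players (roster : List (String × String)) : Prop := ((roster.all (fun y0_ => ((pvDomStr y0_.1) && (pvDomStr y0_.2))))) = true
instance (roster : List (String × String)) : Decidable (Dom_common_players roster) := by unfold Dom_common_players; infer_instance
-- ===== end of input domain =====

-- B replaces A's single-pass mutating-dict grouping by an idiomatic dedup-values + one-scan-per-group
-- dict comprehension (same return value; B is not faster).


-- ===== PORT A =====
-- for val,key in roster.items(): if key not in new_dict: new_dict[key]=[val] else: new_dict[key].append(val)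
def common_players (roster : List (String × String)) : List (String × List String) :=
  (roster.foldl
    (fun d p =>
      if d.contains p.2 = false then d.insert p.2 [p.1]
      else d.insert p.2 (d.getD p.2 [] ++ [p.1]))
    (PySem.Dict.empty : PySem.Dict String (List String))).items

-- ===== PORT B =====
-- {v: [k for k, x in roster.items() if x == v] for v in dict.fromkeys(roster.values())}
-- (the comprehension's keys are the distinct values, so the built dict's items are exactly this map)
def common_players_alt (roster : List (String × String)) : List (String × List String) :=
  (PySem.List.dedup (roster.map (·.2))).map
    (fun v => (v, (roster.filter (fun p => p.2 == v)).map (·.1)))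

-- ===== PRECONDITION & SPEC =====
def Spec_common_players (roster : List (String × String)) (out : List (String × List String)) : Prop := out = common_players_alt roster
instance (roster : List (String × String)) (out : List (String × List String)) : Decidable (Spec_common_players roster out) := by unfold Spec_common_players; infer_instance

-- ===== CLAIM (what is proved, stated in full; the proofs are below) =====
def Claim_equal_common_players : Prop := ∀ (roster : List (String × String)), Dom_common_players roster → Spec_common_players roster (common_players roster)

-- ===== LEMMAS AND PROOFS =====

-- A's branching step is exactly Python's d[k] = d.get(k, []) + [v], i.e. Dict.modify.
lemma step_eq_modify (d : PySem.Dict String (List String)) (p : String × String) :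
    (if d.contains p.2 = false then d.insert p.2 [p.1]
     else d.insert p.2 (d.getD p.2 [] ++ [p.1]))
    = d.modify p.2 [] (fun l => l ++ [p.1]) := by
  by_cases h : d.contains p.2 = true
  · simp [h, PySem.Dict.modify]
  · simp only [Bool.not_eq_true] at h
    simp only [h, if_true, PySem.Dict.modify]
    rw [PySem.Dict.getD_of_not_contains]
    · rfl
    · exact h

-- A's loop rewritten as a uniform modify-fold over the swapped pairs (value first).
lemma common_players_eq_modify_fold (roster : List (String × String)) :
    common_players roster
    = ((roster.map Prod.swap).foldl
        (fun d q => d.modify q.1 [] (fun l => l ++ [q.2]))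
        (PySem.Dict.empty : PySem.Dict String (List String))).items := by
  unfold common_players
  rw [List.foldl_map]
  congr 1
  apply PySem.List.foldl_congr_mem
  intro d p _
  exact step_eq_modify d p

-- ===== VERDICT (by name: the statement is the Claim_ definition above) =====
theorem common_players_spec : Claim_equal_common_players := by
  intro roster _
  unfold Spec_common_players
  rw [common_players_eq_modify_fold]
  have hnd : ((roster.map Prod.swap).foldl
        (fun d q => d.modify q.1 [] (fun l => l ++ [q.2]))
        (PySem.Dict.empty : PySem.Dict String (List String))).keys.Nodup := by
    exact PySem.Dict.nodup_keys_foldl_modify_key _ Prod.fst _ _ _ (by simp [pysem])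
  rw [PySem.Dict.items_eq_map_keys _ hnd []]
  rw [PySem.Dict.keys_foldl_modify_key]
  unfold common_players_alt
  simp only [PySem.List.dedup_eq_ofList, PySem.Dict.keys_empty, PySem.Set.update_nil_left,
    List.map_map]
  have hkeys : List.map (Prod.fst ∘ Prod.swap) roster = roster.map (·.2) := rfl
  rw [hkeys]
  apply List.map_congr_left
  intro v hv
  rw [PySem.Dict.getD_foldl_modify_append]
  simp only [List.filter_map, List.map_map]
  rfl
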